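-- pv_equiv track=rewrite | github.com/mattyding/bufo-bot | utils.py | remove_repeating_pattern
-- ===== SOURCE A (Python) =====
-- def remove_repeating_pattern(arr):
--     for start in range(0, len(arr) // 2):
--         for end in range(start + 1, len(arr)):
--             pattern = arr[start:end]
--             # check if pattern repeats until end
--             # stopping midway through cycle is fine
--             reminder = len(arr[start:]) % len(pattern)
--             if (
--                 arr[start:]
--                 == pattern * (len(arr[start:]) // len(pattern)) + pattern[:reminder]
--             ):
--                 return arr[:start] + pattern
--     return arr
-- ===== SOURCE B (Python) =====
-- def remove_repeating_pattern(arr):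
--     n = len(arr)
--     # t[p] = smallest start from which arr[start:] is p-periodic
--     #      = one past the last index i with arr[i] != arr[i - p]
--     t = [0] * n
--     for p in range(1, n):
--         for i in range(n - 1, p - 1, -1):
--             if arr[i] != arr[i - p]:
--                 t[p] = i - p + 1
--                 break
--     for start in range(n // 2):
--         for p in range(1, n - start):
--             if t[p] <= start:
--                 return arr[:start + p]
--     return arr
-- ===== Notes on version B (the rewrite author's own statement) =====
-- stated objective: faster
-- what changed: Replaces the per-(start,end) tiled-slice construction and comparison with a precomputed last-mismatch threshold table t[p] (one backward scan per shift p), so each periodicity test in the search becomes an O(1) comparison t[p] <= start.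
import Mathlib
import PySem

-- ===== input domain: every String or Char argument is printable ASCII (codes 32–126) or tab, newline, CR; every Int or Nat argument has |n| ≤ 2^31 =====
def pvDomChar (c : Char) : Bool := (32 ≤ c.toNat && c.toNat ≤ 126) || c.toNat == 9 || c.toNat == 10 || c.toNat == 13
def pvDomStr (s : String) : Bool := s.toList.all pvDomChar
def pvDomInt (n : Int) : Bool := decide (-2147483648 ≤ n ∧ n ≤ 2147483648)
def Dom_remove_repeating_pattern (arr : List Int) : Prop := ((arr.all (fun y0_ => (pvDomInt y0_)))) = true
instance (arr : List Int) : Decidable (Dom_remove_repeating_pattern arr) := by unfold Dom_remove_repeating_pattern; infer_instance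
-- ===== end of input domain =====

-- B replaces A's O(n^3) tiled-slice comparisons by a precomputed last-mismatch threshold
-- table with O(1) tests, an O(n^2) algorithm (objective: faster, measured).

-- ===== PORT A =====
-- Python 'pattern * k' for a nonnegative multiplier k (exact: k = m // p ≥ 0 here).
def pyListMul (xs : List Int) : Nat → List Int
  | 0 => []
  | k + 1 => xs ++ pyListMul xs k

-- inner loop 'for end in range(start+1, len(arr))' with early return.
-- Lengths are Nat; Python's // and % on these nonnegative ints coincide with Nat / and %.
def aInner (arr : List Int) (start e : Nat) : Option (List Int) :=
  -- pattern = arr[start:e], tail = arr[start:], reminder = len(tail) % len(pattern),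
  -- written inline; the test is tail == pattern * (len(tail)//len(pattern)) + pattern[:reminder]
  if _h : e < arr.length then
    if PySem.List.slice arr (some (start : Int)) none
        = pyListMul (PySem.List.slice arr (some (start : Int)) (some (e : Int)))
            ((PySem.List.slice arr (some (start : Int)) none).length
              / (PySem.List.slice arr (some (start : Int)) (some (e : Int))).length)
          ++ (PySem.List.slice arr (some (start : Int)) (some (e : Int))).take
              ((PySem.List.slice arr (some (start : Int)) none).length
                % (PySem.List.slice arr (some (start : Int)) (some (e : Int))).length) then
      some (PySem.List.slice arr none (some (start : Int))
        ++ PySem.List.slice arr (some (start : Int)) (some (e : Int)))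
    else
      aInner arr start (e + 1)
  else none
termination_by arr.length - e

-- outer loop 'for start in range(0, len(arr) // 2)'.
def aOuter (arr : List Int) (start : Nat) : List Int :=
  if _h : start < arr.length / 2 then
    match aInner arr start (start + 1) with
    | some r => r
    | none => aOuter arr (start + 1)
  else arr
termination_by arr.length / 2 - start

def remove_repeating_pattern (arr : List Int) : List Int := aOuter arr 0

-- ===== PORT B =====
-- backward scan 'for i in range(n-1, p-1, -1)' with break: position one past the
-- last mismatch arr[i] != arr[i-p], or 0 if none.  arr[i] is in range whenever read.
def bLastBad (arr : List Int) (p i : Nat) : Nat :=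
  if _h : 1 ≤ p ∧ p ≤ i then
    if arr.getD i 0 ≠ arr.getD (i - p) 0 then i - p + 1 else bLastBad arr p (i - 1)
  else 0
termination_by i
decreasing_by omega

-- t = [0] * n updated for p in range(1, n)
def bTable (arr : List Int) : List Nat :=
  (List.range arr.length).map (fun p => if p = 0 then 0 else bLastBad arr p (arr.length - 1))

-- 'for p in range(1, n - start)' with early return
def bInner (arr : List Int) (t : List Nat) (start p : Nat) : Option (List Int) :=
  if p < arr.length - start then
    if t.getD p 0 ≤ start then some (arr.take (start + p))
    else bInner arr t start (p + 1)
  else none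
termination_by arr.length - start - p

-- 'for start in range(n // 2)'
def bOuter (arr : List Int) (t : List Nat) (start : Nat) : List Int :=
  if _h : start < arr.length / 2 then
    match bInner arr t start 1 with
    | some r => r
    | none => bOuter arr t (start + 1)
  else arr
termination_by arr.length / 2 - start

def remove_repeating_pattern_alt (arr : List Int) : List Int :=
  bOuter arr (bTable arr) 0

-- ===== PRECONDITION & SPEC =====
def Spec_remove_repeating_pattern (arr : List Int) (out : List Int) : Prop := out = remove_repeating_pattern_alt arr
instance (arr : List Int) (out : List Int) : Decidable (Spec_remove_repeating_pattern arr out) := by unfold Spec_remove_repeating_pattern; infer_instance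

-- ===== CLAIM (what is proved, stated in full; the proofs are below) =====
def Claim_equal_remove_repeating_pattern : Prop := ∀ (arr : List Int), Dom_remove_repeating_pattern arr → Spec_remove_repeating_pattern arr (remove_repeating_pattern arr)

-- ===== LEMMAS AND PROOFS =====

-- getD bridges
theorem getD_take_lt (l : List Int) (k i : Nat) (h : i < k) :
    (l.take k).getD i 0 = l.getD i 0 := by
  simp [List.getD_eq_getElem?_getD, h]

theorem getD_drop_add (l : List Int) (s i : Nat) :
    (l.drop s).getD i 0 = l.getD (s + i) 0 := by
  simp [List.getD_eq_getElem?_getD, List.getElem?_drop]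

-- ---- B side: characterisation of the backward mismatch scan ----
theorem bLastBad_le_iff (arr : List Int) (p start : Nat) (hp : 1 ≤ p) :
    ∀ i, (bLastBad arr p i ≤ start ↔
      ∀ j, start + p ≤ j → j ≤ i → arr.getD j 0 = arr.getD (j - p) 0) := by
  intro i
  induction i using Nat.strong_induction_on with
  | _ i ih =>
    rw [bLastBad]
    by_cases hg : 1 ≤ p ∧ p ≤ i
    · rw [dif_pos hg]
      by_cases hm : arr.getD i 0 ≠ arr.getD (i - p) 0
      · rw [if_pos hm]
        constructor
        · intro hle j hj1 hj2; exfalso; omega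
        · intro hall
          by_contra hlt
          exact hm (hall i (by omega) (le_refl i))
      · rw [if_neg hm]
        push_neg at hm
        rw [ih (i - 1) (by omega)]
        constructor
        · intro hall j hj1 hj2
          rcases Nat.lt_or_ge j i with hji | hji
          · exact hall j hj1 (by omega)
          · have hji' : j = i := by omega
            subst hji'; exact hm
        · intro hall j hj1 hj2
          exact hall j hj1 (by omega)
    · rw [dif_neg hg]
      constructor
      · intro _ j hj1 hj2; exfalso; omega
      · intro _; exact Nat.zero_le _

-- table lookup
theorem bTable_getD (arr : List Int) (p : Nat) (hp : 1 ≤ p) (hpn : p < arr.length) :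
    (bTable arr).getD p 0 = bLastBad arr p (arr.length - 1) := by
  unfold bTable
  rw [List.getD_eq_getElem?_getD, List.getElem?_map, List.getElem?_range hpn]
  have hne : p ≠ 0 := by omega
  simp [hne]

-- ---- A side: the tiled list ----
theorem pyListMul_length (xs : List Int) : ∀ k, (pyListMul xs k).length = k * xs.length := by
  intro k
  induction k with
  | zero => simp [pyListMul]
  | succ k ih => simp [pyListMul, ih]; ring

theorem pyListMul_getD (xs : List Int) (hx : 1 ≤ xs.length) :
    ∀ k i, i < k * xs.length →
      (pyListMul xs k).getD i 0 = xs.getD (i % xs.length) 0 := by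
  intro k
  induction k with
  | zero => intro i h; omega
  | succ k ih =>
    intro i h
    rw [Nat.succ_mul] at h
    rw [pyListMul]
    by_cases hi : i < xs.length
    · rw [List.getD_eq_getElem?_getD, List.getElem?_append_left hi,
        ← List.getD_eq_getElem?_getD, Nat.mod_eq_of_lt hi]
    · push_neg at hi
      have hmm : i % xs.length = (i - xs.length) % xs.length := by
        conv_lhs => rw [show i = (i - xs.length) + xs.length by omega]
        rw [Nat.add_mod_right]
      rw [List.getD_eq_getElem?_getD, List.getElem?_append_right hi,
        ← List.getD_eq_getElem?_getD, ih (i - xs.length) (by omega), hmm]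

-- the full tile T = pat * (m/p) ++ pat[:m%p]
theorem tile_length (pat : List Int) (m : Nat) (hp : 1 ≤ pat.length) :
    (pyListMul pat (m / pat.length) ++ pat.take (m % pat.length)).length = m := by
  have hmod := Nat.mod_lt m (show 0 < pat.length by omega)
  have hdm := Nat.div_add_mod m pat.length
  have hcomm : m / pat.length * pat.length = pat.length * (m / pat.length) :=
    Nat.mul_comm _ _
  simp [pyListMul_length]
  omega

theorem tile_getD (pat : List Int) (m i : Nat) (hp : 1 ≤ pat.length) (him : i < m) :
    (pyListMul pat (m / pat.length) ++ pat.take (m % pat.length)).getD i 0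
      = pat.getD (i % pat.length) 0 := by
  set p := pat.length with hpdef
  have hmod := Nat.mod_lt m (show 0 < p by omega)
  have hdm := Nat.div_add_mod m p
  have hcomm : m / p * p = p * (m / p) := Nat.mul_comm _ _
  by_cases hi : i < (m / p) * p
  · rw [List.getD_eq_getElem?_getD,
      List.getElem?_append_left (by rw [pyListMul_length]; exact hi),
      ← List.getD_eq_getElem?_getD, pyListMul_getD pat hp _ i hi]
  · push_neg at hi
    have hlen : (pyListMul pat (m / p)).length = (m / p) * p := pyListMul_length pat _
    have hrem : i - m / p * p < m % p := by omega
    have hmm : i % p = i - m / p * p := by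
      conv_lhs => rw [show i = (i - m / p * p) + (m / p) * p by omega]
      rw [Nat.add_mul_mod_self_right, Nat.mod_eq_of_lt (by omega)]
    rw [List.getD_eq_getElem?_getD, List.getElem?_append_right (by omega),
      ← List.getD_eq_getElem?_getD, hlen, getD_take_lt pat _ _ hrem, hmm]

-- A's tiling equality ⟺ pointwise "s[i] = s[i mod p]"
theorem tiling_iff_mod (s : List Int) (p : Nat) (hp : 1 ≤ p) (hpm : p ≤ s.length) :
    (s = pyListMul (s.take p) (s.length / (s.take p).length)
        ++ (s.take p).take (s.length % (s.take p).length))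
      ↔ ∀ i, i < s.length → s.getD i 0 = s.getD (i % p) 0 := by
  have hpl : (s.take p).length = p := by simp [Nat.min_eq_left hpm]
  rw [hpl]
  have hlen : (pyListMul (s.take p) (s.length / p) ++ (s.take p).take (s.length % p)).length
      = s.length := by
    have := tile_length (s.take p) s.length (by omega)
    rw [hpl] at this; exact this
  constructor
  · intro heq i hi
    conv_lhs => rw [heq]
    have := tile_getD (s.take p) s.length i (by rw [hpl]; omega) hi
    rw [hpl] at this
    rw [this, getD_take_lt s p _ (Nat.mod_lt i (by omega))]
  · intro hall
    apply List.ext_getElem (by rw [hlen])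
    intro i h1 h2
    have hgd := hall i h1
    have htg := tile_getD (s.take p) s.length i (by rw [hpl]; omega) h1
    rw [hpl] at htg
    rw [← List.getD_eq_getElem (d := (0:Int)) (hn := h2), ← List.getD_eq_getElem (d := (0:Int)) (hn := h1), htg,
      getD_take_lt s p _ (Nat.mod_lt i (by omega))]
    exact hgd

theorem mod_iff_shift (s : List Int) (p : Nat) (hp : 1 ≤ p) :
    (∀ i, i < s.length → s.getD i 0 = s.getD (i % p) 0)
      ↔ (∀ i, p ≤ i → i < s.length → s.getD i 0 = s.getD (i - p) 0) := by
  constructor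
  · intro h i hpi hi
    rw [h i hi]
    have hmm : (i - p) % p = i % p := by
      conv_rhs => rw [show i = (i - p) + p by omega]
      rw [Nat.add_mod_right]
    by_cases hip : i - p < p
    · rw [← hmm, Nat.mod_eq_of_lt hip]
    · rw [h (i - p) (by omega), hmm]
  · intro h i
    induction i using Nat.strong_induction_on with
    | _ i ih =>
      intro hi
      by_cases hip : i < p
      · rw [Nat.mod_eq_of_lt hip]
      · push_neg at hip
        rw [h i hip hi, ih (i - p) (by omega) (by omega)]
        congr 1
        conv_rhs => rw [show i = (i - p) + p by omega]
        rw [Nat.add_mod_right]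

-- A's condition at (start, start+p) ⟺ B's threshold test
theorem cond_iff (arr : List Int) (start p : Nat) (hp : 1 ≤ p) (hlt : start + p < arr.length) :
    (PySem.List.slice arr (some (start : Int)) none
        = pyListMul (PySem.List.slice arr (some (start : Int)) (some ((start + p : Nat) : Int)))
            ((PySem.List.slice arr (some (start : Int)) none).length
              / (PySem.List.slice arr (some (start : Int)) (some ((start + p : Nat) : Int))).length)
          ++ (PySem.List.slice arr (some (start : Int)) (some ((start + p : Nat) : Int))).take
              ((PySem.List.slice arr (some (start : Int)) none).length
                % (PySem.List.slice arr (some (start : Int)) (some ((start + p : Nat) : Int))).length))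
      ↔ (bTable arr).getD p 0 ≤ start := by
  have hs : PySem.List.slice arr (some (start : Int)) none = arr.drop start :=
    PySem.List.slice_from_natCast arr start
  have hpat : PySem.List.slice arr (some (start : Int)) (some ((start + p : Nat) : Int))
      = (arr.drop start).take p := by
    have h := PySem.List.slice_natCast arr start (start + p)
    simpa using h
  rw [hs, hpat]
  set s := arr.drop start with hsdef
  have hsl : s.length = arr.length - start := by simp [hsdef]
  have hpm : p ≤ s.length := by omega
  rw [tiling_iff_mod s p hp hpm, mod_iff_shift s p hp,
    bTable_getD arr p hp (by omega),
    bLastBad_le_iff arr p start hp (arr.length - 1)]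
  constructor
  · intro h j hj1 hj2
    have hcall := h (j - start) (by omega) (by omega)
    rw [hsdef, getD_drop_add, getD_drop_add] at hcall
    rw [show start + (j - start) = j by omega] at hcall
    rw [show start + (j - start - p) = j - p by omega] at hcall
    exact hcall
  · intro h i hpi hi
    have hcall := h (start + i) (by omega) (by omega)
    rw [hsdef, getD_drop_add, getD_drop_add]
    rw [show start + i - p = start + (i - p) by omega] at hcall
    exact hcall

-- inner loops agree (fuel = remaining iterations)
theorem inner_eq_aux (arr : List Int) (start : Nat) (hs : start ≤ arr.length) :
    ∀ k p, 1 ≤ p → arr.length - (start + p) ≤ k →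
      aInner arr start (start + p) = bInner arr (bTable arr) start p := by
  intro k
  induction k with
  | zero =>
    intro p hp hk
    rw [aInner, bInner, dif_neg (by omega), if_neg (by omega)]
  | succ k ih =>
    intro p hp hk
    rw [aInner, bInner]
    by_cases hlt : start + p < arr.length
    · rw [dif_pos hlt, if_pos (show p < arr.length - start by omega)]
      by_cases hc : (PySem.List.slice arr (some (start : Int)) none
          = pyListMul (PySem.List.slice arr (some (start : Int)) (some ((start + p : Nat) : Int)))
              ((PySem.List.slice arr (some (start : Int)) none).length
                / (PySem.List.slice arr (some (start : Int)) (some ((start + p : Nat) : Int))).length)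
            ++ (PySem.List.slice arr (some (start : Int)) (some ((start + p : Nat) : Int))).take
                ((PySem.List.slice arr (some (start : Int)) none).length
                  % (PySem.List.slice arr (some (start : Int)) (some ((start + p : Nat) : Int))).length))
      · rw [if_pos hc, if_pos ((cond_iff arr start p hp hlt).mp hc)]
        congr 1
        rw [PySem.List.slice_to_natCast]
        have hpat : PySem.List.slice arr (some (start : Int)) (some ((start + p : Nat) : Int))
            = (arr.drop start).take p := by
          have h := PySem.List.slice_natCast arr start (start + p)
          simpa using h
        rw [hpat, ← List.take_add]
      · rw [if_neg hc, if_neg (fun h => hc ((cond_iff arr start p hp hlt).mpr h))]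
        rw [show start + p + 1 = start + (p + 1) by omega]
        exact ih (p + 1) (by omega) (by omega)
    · rw [dif_neg hlt, if_neg (by omega)]

theorem inner_eq (arr : List Int) (start : Nat) (hs : start ≤ arr.length) :
    aInner arr start (start + 1) = bInner arr (bTable arr) start 1 :=
  inner_eq_aux arr start hs arr.length 1 (le_refl 1) (by omega)

-- outer loops agree
theorem outer_eq_aux (arr : List Int) :
    ∀ k start, arr.length / 2 - start ≤ k →
      aOuter arr start = bOuter arr (bTable arr) start := by
  intro k
  induction k with
  | zero =>
    intro start hk
    rw [aOuter, bOuter, dif_neg (by omega), dif_neg (by omega)]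
  | succ k ih =>
    intro start hk
    rw [aOuter, bOuter]
    by_cases hlt : start < arr.length / 2
    · rw [dif_pos hlt, dif_pos hlt]
      have hs : start ≤ arr.length := by
        have := Nat.div_le_self arr.length 2
        omega
      rw [inner_eq arr start hs]
      cases bInner arr (bTable arr) start 1 with
      | some r => rfl
      | none => exact ih (start + 1) (by omega)
    · rw [dif_neg hlt, dif_neg hlt]

-- ===== VERDICT (by name: the statement is the Claim_ definition above) =====
theorem remove_repeating_pattern_spec : Claim_equal_remove_repeating_pattern := by
  intro arr _
  unfold Spec_remove_repeating_pattern remove_repeating_pattern remove_repeating_pattern_alt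
  exact outer_eq_aux arr (arr.length / 2) 0 (by omega)
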